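-- pv_equiv track=rewrite | github.com/fallen777alone/python_Gozhiy | pz_9/main.py | find_min_sales
-- ===== SOURCE A (Python) =====
-- def find_min_sales(sales_data):
--     # Разбиваем строку на элементы
--     elements = sales_data.split()
--
--     products = {}
--     current_product = None
--
--     for elem in elements:
--         if elem.isalpha():
--             # Это название продукта
--             current_product = elem
--             products[current_product] = []
--         else:
--             # Это число продаж
--             if current_product is not None:
--                 products[current_product].append(int(elem))
--
--     # Находим минимальные продажи для каждого продукта
--     min_sales = {}
--     for product, sales in products.items():
--         min_sales[product] = min(sales) if sales else 0
--
--     return min_sales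
-- ===== SOURCE B (Python) =====
-- def find_min_sales(sales_data):
--     # One pass: maintain a running minimum per product (None = no sales yet),
--     # then replace remaining None by 0. No per-product lists are built.
--     result = {}
--     current = None
--     for tok in sales_data.split():
--         if tok.isalpha():
--             current = tok
--             result[current] = None
--         elif current is not None:
--             v = int(tok)
--             m = result[current]
--             result[current] = v if m is None else min(m, v)
--     return {p: (0 if m is None else m) for p, m in result.items()}
-- ===== Notes on version B (the rewrite author's own statement) =====
-- stated objective: alternative
-- what changed: B replaces A's two-phase build-lists-then-reduce (a dict of per-product sales lists, then a second loop taking min of each list) by a single pass that maintains a running minimum per product (None sentinel for 'no sales yet'), then maps None to 0.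
import Mathlib
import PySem

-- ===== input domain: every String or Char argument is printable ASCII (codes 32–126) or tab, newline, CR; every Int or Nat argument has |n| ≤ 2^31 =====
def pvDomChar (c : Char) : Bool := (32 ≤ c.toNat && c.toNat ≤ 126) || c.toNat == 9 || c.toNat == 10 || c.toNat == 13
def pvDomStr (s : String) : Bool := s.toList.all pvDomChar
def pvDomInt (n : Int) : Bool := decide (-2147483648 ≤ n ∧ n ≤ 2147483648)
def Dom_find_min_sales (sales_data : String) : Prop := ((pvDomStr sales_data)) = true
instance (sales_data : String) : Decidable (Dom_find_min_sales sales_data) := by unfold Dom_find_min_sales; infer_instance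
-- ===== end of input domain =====

-- B is an alternative single-pass algorithm: a running minimum per product instead of
-- building per-product sales lists and reducing them afterwards (same asymptotic cost).

-- ===== PORT A =====
-- loop body of A's first for-loop (the dict maps product → list of sales; snd = current_product)
def pvStepA (st : PySem.Dict String (List Int) × Option String) (elem : String) :
    PySem.Dict String (List Int) × Option String :=
  if PySem.Str.strIsalpha elem then
    (st.1.insert elem [], some elem)
  else
    match st.2 with
    -- products[current_product].append(int(elem)); int(elem) = none (ValueError) is excluded
    -- by Pre_; the key is always present, so modify's default [] never fires
    | some p => (st.1.modify p [] (fun l => l ++ [(PySem.Int.ofStr? elem).getD 0]), st.2)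
    | none => st

-- min(sales) if sales else 0
def pvMinVal (sales : List Int) : Int :=
  match PySem.List.min? sales (fun x => x) with
  | some m => m
  | none => 0

def find_min_sales (sales_data : String) : List (String × Int) :=
  let elements := PySem.Str.split₀ sales_data
  let products := (elements.foldl pvStepA (PySem.Dict.empty, none)).1
  (products.items.foldl
      (fun (acc : PySem.Dict String Int) pv => acc.insert pv.1 (pvMinVal pv.2))
      PySem.Dict.empty).items

-- ===== PORT B =====
-- loop body of B's single pass (the dict maps product → running minimum, none = no sales yet)
def pvStepB (st : PySem.Dict String (Option Int) × Option String) (tok : String) :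
    PySem.Dict String (Option Int) × Option String :=
  if PySem.Str.strIsalpha tok then
    (st.1.insert tok none, some tok)
  else
    match st.2 with
    | some p =>
      let v := (PySem.Int.ofStr? tok).getD 0  -- int(tok); none (ValueError) excluded by Pre_
      (st.1.insert p (match st.1.getD p none with
                      | none => some v
                      | some m => some (min m v)), st.2)
    | none => st

def find_min_sales_alt (sales_data : String) : List (String × Int) :=
  let result := ((PySem.Str.split₀ sales_data).foldl pvStepB (PySem.Dict.empty, none)).1
  result.items.map (fun pm => (pm.1, pm.2.getD 0))

-- ===== PRECONDITION & SPEC =====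
-- Pre_ excludes exactly the inputs where Python raises ValueError: a token that is neither
-- alphabetic nor a valid int literal, occurring after some alphabetic token (before the first
-- product such tokens are skipped and both programs accept them).
def Pre_find_min_sales (sales_data : String) : Prop :=
  ∀ i ∈ List.range (PySem.Str.split₀ sales_data).length,
    (PySem.Str.strIsalpha ((PySem.Str.split₀ sales_data).getD i "") = false ∧
     (PySem.Int.ofStr? ((PySem.Str.split₀ sales_data).getD i "")).isSome = false) →
    ∀ j ∈ List.range i, PySem.Str.strIsalpha ((PySem.Str.split₀ sales_data).getD j "") = false
instance (sales_data : String) : Decidable (Pre_find_min_sales sales_data) := by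
  unfold Pre_find_min_sales; infer_instance

def pvWitness_find_min_sales : String := "Apple 7 3 Banana 5 Apple"

def Spec_find_min_sales (sales_data : String) (out : List (String × Int)) : Prop :=
  out = find_min_sales_alt sales_data
instance (sales_data : String) (out : List (String × Int)) :
    Decidable (Spec_find_min_sales sales_data out) := by
  unfold Spec_find_min_sales; infer_instance

-- ===== CLAIM (what is proved, stated in full; the proofs are below) =====
def Claim_equal_find_min_sales : Prop :=
  ∀ (sales_data : String), Dom_find_min_sales sales_data → Pre_find_min_sales sales_data →
    Spec_find_min_sales sales_data (find_min_sales sales_data)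

-- ===== LEMMAS AND PROOFS =====

-- running minimum of a list of sales, as B maintains it (none = empty so far)
def pvRunMin (l : List Int) : Option Int :=
  l.foldl (fun o v => some (match o with | none => v | some m => min m v)) none

-- value map relating A's per-product lists to B's running minima
def pvF (kl : String × List Int) : String × Option Int := (kl.1, pvRunMin kl.2)

theorem pvRunMin_append (l : List Int) (v : Int) :
    pvRunMin (l ++ [v]) = some (match pvRunMin l with | none => v | some m => min m v) := by
  simp [pvRunMin, List.foldl_append]

theorem pvMin?_eq_runMin (l : List Int) : PySem.List.min? l (fun x => x) = pvRunMin l := by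
  unfold PySem.List.min? pvRunMin
  induction l using List.reverseRecOn with
  | nil => rfl
  | append_singleton t a ih =>
    rw [List.foldl_append, List.foldl_append, ih]
    cases t.foldl (fun o v => some (match o with | none => v | some m => min m v)) none with
    | none => rfl
    | some m =>
      simp only [List.foldl_cons, List.foldl_nil, min_def]
      split_ifs <;> simp <;> omega

theorem pv_contains_map (L : List (String × List Int)) (k : String) :
    (PySem.Dict.mk (L.map pvF)).contains k = (PySem.Dict.mk L).contains k := by
  simp [PySem.Dict.contains, List.any_map, Function.comp_def, pvF]

theorem pv_get?_map (L : List (String × List Int)) (k : String) :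
    (PySem.Dict.mk (L.map pvF)).get? k = ((PySem.Dict.mk L).get? k).map pvRunMin := by
  induction L with
  | nil => rfl
  | cons a t ih =>
    obtain ⟨ka, va⟩ := a
    rw [List.map_cons]
    show (PySem.Dict.mk ((ka, pvRunMin va) :: t.map pvF)).get? k = _
    rw [PySem.Dict.get?_mk_cons, PySem.Dict.get?_mk_cons]
    by_cases h : ka == k
    · simp [h]
    · simp [h, ih]

theorem pv_getD_map (L : List (String × List Int)) (k : String) :
    (PySem.Dict.mk (L.map pvF)).getD k none = pvRunMin ((PySem.Dict.mk L).getD k []) := by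
  simp only [PySem.Dict.getD, pv_get?_map]
  cases (PySem.Dict.mk L).get? k with
  | none => rfl
  | some l => rfl

theorem pv_insert_map (L : List (String × List Int)) (k : String) (vA : List Int)
    (vB : Option Int) (h : pvRunMin vA = vB) :
    (((PySem.Dict.mk L).insert k vA).items).map pvF =
      ((PySem.Dict.mk (L.map pvF)).insert k vB).items := by
  simp only [PySem.Dict.insert, pv_contains_map]
  by_cases hc : (PySem.Dict.mk L).contains k = true
  · simp only [hc, if_pos, List.map_map]
    apply List.map_congr_left
    intro p _
    by_cases hp : p.1 == k <;> simp [Function.comp, pvF, hp, h]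
  · simp [hc, pvF, h]

theorem pvMinVal_eq (l : List Int) : pvMinVal l = (pvRunMin l).getD 0 := by
  unfold pvMinVal
  rw [pvMin?_eq_runMin]
  cases pvRunMin l <;> rfl

-- the loop invariant: B's dict holds the running minimum of A's list, entrywise in order
theorem pv_loop (ts : List String) (LA : List (String × List Int)) (cur : Option String) :
    (ts.foldl pvStepB (PySem.Dict.mk (LA.map pvF), cur)).1.items =
      ((ts.foldl pvStepA (PySem.Dict.mk LA, cur)).1.items).map pvF ∧
    (ts.foldl pvStepB (PySem.Dict.mk (LA.map pvF), cur)).2 =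
      (ts.foldl pvStepA (PySem.Dict.mk LA, cur)).2 := by
  induction ts generalizing LA cur with
  | nil => exact ⟨rfl, rfl⟩
  | cons tok ts ih =>
    rw [List.foldl_cons, List.foldl_cons]
    by_cases ha : PySem.Str.strIsalpha tok
    · have ha' : PySem.Chars.strIsalpha tok.toList = true := ha
      have hA : pvStepA (PySem.Dict.mk LA, cur) tok =
          (PySem.Dict.mk (((PySem.Dict.mk LA).insert tok ([] : List Int)).items), some tok) := by
        simp [pvStepA, ha']
      have hB : pvStepB (PySem.Dict.mk (LA.map pvF), cur) tok =
          (PySem.Dict.mk ((((PySem.Dict.mk LA).insert tok ([] : List Int)).items).map pvF),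
            some tok) := by
        simp only [pvStepB, PySem.Str.strIsalpha, ha', if_pos]
        rw [show (PySem.Dict.mk (LA.map pvF)).insert tok none =
              PySem.Dict.mk ((((PySem.Dict.mk LA).insert tok ([] : List Int)).items).map pvF) from
            PySem.Dict.ext (pv_insert_map LA tok [] none rfl).symm]
      rw [hA, hB]
      exact ih _ _
    · have ha' : PySem.Chars.strIsalpha tok.toList = false := by
        simpa [PySem.Str.strIsalpha] using ha
      cases cur with
      | none =>
        have hA : pvStepA (PySem.Dict.mk LA, none) tok = (PySem.Dict.mk LA, none) := by
          simp [pvStepA, ha']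
        have hB : pvStepB (PySem.Dict.mk (LA.map pvF), none) tok =
            (PySem.Dict.mk (LA.map pvF), none) := by
          simp [pvStepB, ha']
        rw [hA, hB]
        exact ih _ _
      | some p =>
        have hval : pvRunMin ((PySem.Dict.mk LA).getD p [] ++ [(PySem.Int.ofStr? tok).getD 0]) =
            (match (PySem.Dict.mk (LA.map pvF)).getD p none with
             | none => some ((PySem.Int.ofStr? tok).getD 0)
             | some m => some (min m ((PySem.Int.ofStr? tok).getD 0))) := by
          rw [pv_getD_map, pvRunMin_append]
          cases pvRunMin ((PySem.Dict.mk LA).getD p []) <;> rfl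
        have hA : pvStepA (PySem.Dict.mk LA, some p) tok =
            (PySem.Dict.mk (((PySem.Dict.mk LA).insert p
              ((PySem.Dict.mk LA).getD p [] ++ [(PySem.Int.ofStr? tok).getD 0])).items),
              some p) := by
          simp [pvStepA, ha', PySem.Dict.modify]
        have hB : pvStepB (PySem.Dict.mk (LA.map pvF), some p) tok =
            (PySem.Dict.mk ((((PySem.Dict.mk LA).insert p
              ((PySem.Dict.mk LA).getD p [] ++ [(PySem.Int.ofStr? tok).getD 0])).items).map pvF),
              some p) := by
          simp only [pvStepB, PySem.Str.strIsalpha, ha', Bool.false_eq_true, if_neg,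
            not_false_iff]
          rw [show (PySem.Dict.mk (LA.map pvF)).insert p
                (match (PySem.Dict.mk (LA.map pvF)).getD p none with
                 | none => some ((PySem.Int.ofStr? tok).getD 0)
                 | some m => some (min m ((PySem.Int.ofStr? tok).getD 0))) =
              PySem.Dict.mk ((((PySem.Dict.mk LA).insert p
                ((PySem.Dict.mk LA).getD p [] ++ [(PySem.Int.ofStr? tok).getD 0])).items).map pvF) from
            PySem.Dict.ext (pv_insert_map LA p _ _ hval).symm]
        rw [hA, hB]
        exact ih _ _

-- keys of a dict after insert: unchanged when present, appended when new
theorem pv_keys_insert {v : Type} (d : PySem.Dict String v) (k : String) (x : v) :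
    (d.insert k x).items.map Prod.fst =
      if d.contains k then d.items.map Prod.fst else d.items.map Prod.fst ++ [k] := by
  unfold PySem.Dict.insert
  by_cases hc : d.contains k
  · simp only [hc, if_pos, List.map_map]
    apply List.map_congr_left
    intro p _
    by_cases hp : p.1 == k
    · simp [Function.comp, hp]
      exact (eq_of_beq hp).symm
    · simp [Function.comp, hp]
  · simp [hc]

theorem pv_keys_nodup_insert {v : Type} (d : PySem.Dict String v) (k : String) (x : v)
    (h : (d.items.map Prod.fst).Nodup) : ((d.insert k x).items.map Prod.fst).Nodup := by
  rw [pv_keys_insert]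
  by_cases hc : d.contains k
  · simpa [hc] using h
  · have hk : k ∉ d.items.map Prod.fst := by
      simp only [PySem.Dict.contains, List.any_eq_true, beq_iff_eq] at hc
      simp only [List.mem_map]
      rintro ⟨p, hp, rfl⟩
      exact hc ⟨p, hp, rfl⟩
    simp [hc, List.nodup_append, h]
    intro a x hmem hak
    subst hak
    exact hk (List.mem_map.mpr ⟨(a, x), hmem, rfl⟩)

theorem pv_loop_nodup (ts : List String) (st : PySem.Dict String (List Int) × Option String)
    (h : (st.1.items.map Prod.fst).Nodup) :
    ((ts.foldl pvStepA st).1.items.map Prod.fst).Nodup := by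
  induction ts generalizing st with
  | nil => exact h
  | cons tok ts ih =>
    rw [List.foldl_cons]
    apply ih
    unfold pvStepA
    by_cases ha : PySem.Str.strIsalpha tok
    · simp only [ha, if_pos]
      exact pv_keys_nodup_insert _ _ _ h
    · simp only [ha, Bool.false_eq_true, if_neg, not_false_iff]
      cases hc : st.2 with
      | none => exact h
      | some p => exact pv_keys_nodup_insert _ _ _ h

-- A's second loop: rebuilding a dict from distinct-keyed items is a map over them
theorem pv_foldl_insert (L : List (String × List Int)) (acc : PySem.Dict String Int)
    (h : (acc.items.map Prod.fst ++ L.map Prod.fst).Nodup) :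
    (L.foldl (fun acc pv => acc.insert pv.1 (pvMinVal pv.2)) acc).items =
      acc.items ++ L.map (fun pv => (pv.1, pvMinVal pv.2)) := by
  induction L generalizing acc with
  | nil => simp
  | cons a t ih =>
    obtain ⟨k, l⟩ := a
    have hk : k ∉ acc.items.map Prod.fst := by
      intro hmem
      have hd := List.disjoint_of_nodup_append h
      exact hd hmem (by simp)
    have hc : acc.contains k = false := by
      simp only [PySem.Dict.contains, List.any_eq_false, beq_iff_eq]
      intro p hp hpk
      exact hk (List.mem_map.mpr ⟨p, hp, hpk⟩)
    rw [List.foldl_cons]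
    have hins : acc.insert k (pvMinVal l) =
        PySem.Dict.mk (acc.items ++ [(k, pvMinVal l)]) := by
      apply PySem.Dict.ext
      simp [PySem.Dict.insert, hc]
    rw [hins, ih]
    · simp
    · simp only [List.map_append, List.map_cons, List.map_nil]
      have : (acc.items.map Prod.fst ++ [k]) ++ t.map Prod.fst =
          acc.items.map Prod.fst ++ (k :: t.map Prod.fst) := by simp
      rw [this]
      simpa using h

-- ===== VERDICT (by name: the statement is the Claim_ definition above) =====
theorem find_min_sales_spec : Claim_equal_find_min_sales := by
  intro sales_data _hd _hp
  unfold Spec_find_min_sales find_min_sales find_min_sales_alt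
  simp only []
  have hrel := pv_loop (PySem.Str.split₀ sales_data) [] none
  have hnd : ((((PySem.Str.split₀ sales_data).foldl pvStepA
      (PySem.Dict.empty, none)).1.items).map Prod.fst).Nodup :=
    pv_loop_nodup _ _ (by simp [PySem.Dict.empty])
  rw [pv_foldl_insert _ PySem.Dict.empty (by simpa [PySem.Dict.empty] using hnd)]
  have hB : ((PySem.Str.split₀ sales_data).foldl pvStepB (PySem.Dict.empty, none)).1.items =
      (((PySem.Str.split₀ sales_data).foldl pvStepA
        (PySem.Dict.empty, none)).1.items).map pvF := hrel.1
  rw [hB, List.map_map]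
  simp only [PySem.Dict.empty, List.nil_append]
  apply List.map_congr_left
  intro pv _
  simp [Function.comp, pvF, pvMinVal_eq]
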